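-- pv_equiv track=rewrite | github.com/JEschete2651/EE800_820 | Code/Tools/CampaignCollect/merge_dataset.py | is_degenerate
-- ===== SOURCE A (Python) =====
-- def is_degenerate(rows, split_map, label_cols):
--     """A split is degenerate if any of the listed label columns has a
--     class missing from val or test. Returns the list of (col, split,
--     missing_classes) tuples; empty list means non-degenerate.
--     """
--     from collections import defaultdict
--     issues = []
--     for col in label_cols:
--         by_split = defaultdict(set)
--         all_classes = set()
--         for i, row in enumerate(rows):
--             cls = row[col]
--             by_split[split_map.get(i, "train")].add(cls)
--             all_classes.add(cls)
--         for tag in ("val", "test"):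
--             missing = all_classes - by_split[tag]
--             if missing:
--                 issues.append((col, tag, missing))
--     return issues
-- ===== SOURCE B (Python) =====
-- def is_degenerate(rows, split_map, label_cols):
--     """One pass over the rows builds, per label column, an INVERTED index
--     mapping each class to the set of split tags it occurs in; a class is
--     missing from a split iff that tag is absent from its tag-set (no
--     per-split class sets, no set differences)."""
--     index = [dict() for _ in label_cols]  # per column: class -> set of split tags
--     for i, row in enumerate(rows):
--         tag = split_map.get(i, "train")
--         for j, col in enumerate(label_cols):
--             index[j].setdefault(row[col], set()).add(tag)
--     issues = []
--     for col, classes in zip(label_cols, index):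
--         for tag in ("val", "test"):
--             missing = {cls for cls, tags in classes.items() if tag not in tags}
--             if missing:
--                 issues.append((col, tag, missing))
--     return issues
-- ===== Notes on version B (the rewrite author's own statement) =====
-- stated objective: alternative
-- what changed: A scans the rows once per label column, grouping classes by split tag and reporting set differences all_classes - by_split[tag]; B makes one pass over the rows building an inverted index class -> set-of-split-tags per column and reports, with no set subtraction, the classes whose tag-set lacks 'val'/'test'.
import Mathlib
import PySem

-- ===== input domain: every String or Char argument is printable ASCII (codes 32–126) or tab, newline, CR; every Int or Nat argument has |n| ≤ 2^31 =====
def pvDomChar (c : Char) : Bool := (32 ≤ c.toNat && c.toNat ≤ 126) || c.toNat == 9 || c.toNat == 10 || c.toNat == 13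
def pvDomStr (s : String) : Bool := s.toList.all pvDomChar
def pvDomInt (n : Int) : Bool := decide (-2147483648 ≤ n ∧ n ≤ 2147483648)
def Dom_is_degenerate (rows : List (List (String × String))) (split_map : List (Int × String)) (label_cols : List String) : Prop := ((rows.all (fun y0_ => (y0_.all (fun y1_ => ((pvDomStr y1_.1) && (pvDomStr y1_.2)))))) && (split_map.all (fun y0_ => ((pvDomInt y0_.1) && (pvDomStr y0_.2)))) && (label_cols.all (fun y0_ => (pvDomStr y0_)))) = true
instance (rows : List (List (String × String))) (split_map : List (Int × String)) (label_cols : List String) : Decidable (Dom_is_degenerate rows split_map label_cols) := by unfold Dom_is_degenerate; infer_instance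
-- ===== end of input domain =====

-- B replaces A's per-column grouping of classes by split tag and its set differences by a
-- single pass over the rows building an INVERTED index (class -> set of split tags) per
-- column; a class is reported missing from a split iff its tag-set lacks that tag
-- (alternative decomposition; same asymptotic cost). Equivalence proved on Pre_ (every
-- label column present in every row; elsewhere Python A raises KeyError).

-- ===== PORT A =====
def is_degenerate (rows : List (List (String × String))) (split_map : List (Int × String)) (label_cols : List String) : List (String × String × List String) :=
  label_cols.foldl (fun issues col =>
    let st := (PySem.List.enumerate rows).foldl
      (fun (st : PySem.Dict String (PySem.Set String) × PySem.Set String) ir =>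
        let cls := PySem.Dict.getD (PySem.Dict.mk ir.2) col ""   -- row[col]; KeyError (excluded by Pre_) modelled by the unused default
        let tag := PySem.Dict.getD (PySem.Dict.mk split_map) ir.1 "train"
        (PySem.Dict.insert st.1 tag (PySem.Set.add (PySem.Dict.getD st.1 tag PySem.Set.empty) cls),
         PySem.Set.add st.2 cls))
      (PySem.Dict.empty, PySem.Set.empty)
    let issues :=
      let missing := PySem.Set.diff st.2 (PySem.Dict.getD st.1 "val" PySem.Set.empty)
      if missing.isEmpty then issues else issues ++ [(col, "val", missing)]
    let missing := PySem.Set.diff st.2 (PySem.Dict.getD st.1 "test" PySem.Set.empty)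
    if missing.isEmpty then issues else issues ++ [(col, "test", missing)]) []

-- ===== PORT B =====
-- one step of B's inner 'for j, col in enumerate(label_cols)' loop:
-- index[j].setdefault(row[col], set()).add(tag) is Dict.modify at key row[col]
def pvIdxRow (row : List (String × String)) (tag : String) :
    List String → List (PySem.Dict String (PySem.Set String)) →
    List (PySem.Dict String (PySem.Set String))
  | c :: cs, d :: ds =>
      PySem.Dict.modify d (PySem.Dict.getD (PySem.Dict.mk row) c "") PySem.Set.empty
        (fun s => PySem.Set.add s tag)   -- row[col]; KeyError excluded by Pre_
      :: pvIdxRow row tag cs ds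
  | _, _ => []

def is_degenerate_alt (rows : List (List (String × String))) (split_map : List (Int × String)) (label_cols : List String) : List (String × String × List String) :=
  let index := (PySem.List.enumerate rows).foldl
    (fun st ir => pvIdxRow ir.2 (PySem.Dict.getD (PySem.Dict.mk split_map) ir.1 "train") label_cols st)
    (label_cols.map (fun _ => PySem.Dict.empty))
  (label_cols.zip index).foldl (fun issues ci =>
    let issues :=
      let missing := PySem.Set.ofList (((ci.2.items.filter
        (fun p => !(PySem.Set.contains p.2 "val"))).map (·.1)))
      if missing.isEmpty then issues else issues ++ [(ci.1, "val", missing)]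
    let missing := PySem.Set.ofList (((ci.2.items.filter
      (fun p => !(PySem.Set.contains p.2 "test"))).map (·.1)))
    if missing.isEmpty then issues else issues ++ [(ci.1, "test", missing)]) []

-- ===== PRECONDITION & SPEC =====
-- Pre_ excludes exactly the inputs where Python A raises KeyError: a row lacking one of the label columns.
def Pre_is_degenerate (rows : List (List (String × String))) (split_map : List (Int × String)) (label_cols : List String) : Prop :=
  ∀ r ∈ rows, ∀ c ∈ label_cols, (PySem.Dict.mk r).contains c = true
instance (rows : List (List (String × String))) (split_map : List (Int × String)) (label_cols : List String) : Decidable (Pre_is_degenerate rows split_map label_cols) := by unfold Pre_is_degenerate; infer_instance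

def pvWitness_is_degenerate : (List (List (String × String))) × (List (Int × String)) × List String :=
  ([[("a", "x")], [("a", "y")]], [((1 : Int), "val")], ["a"])

def Spec_is_degenerate (rows : List (List (String × String))) (split_map : List (Int × String)) (label_cols : List String) (out : List (String × String × List String)) : Prop := out = is_degenerate_alt rows split_map label_cols
instance (rows : List (List (String × String))) (split_map : List (Int × String)) (label_cols : List String) (out : List (String × String × List String)) : Decidable (Spec_is_degenerate rows split_map label_cols out) := by unfold Spec_is_degenerate; infer_instance

-- ===== CLAIM (what is proved, stated in full; the proofs are below) =====
def Claim_equal_is_degenerate : Prop := ∀ (rows : List (List (String × String))) (split_map : List (Int × String)) (label_cols : List String), Dom_is_degenerate rows split_map label_cols → Pre_is_degenerate rows split_map label_cols → Spec_is_degenerate rows split_map label_cols (is_degenerate rows split_map label_cols)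

-- ===== LEMMAS AND PROOFS =====

-- shorthands for the two fields read from an enumerated row
def pvTag (sm : List (Int × String)) (ir : Int × List (String × String)) : String :=
  PySem.Dict.getD (PySem.Dict.mk sm) ir.1 "train"
def pvCls (c : String) (ir : Int × List (String × String)) : String :=
  PySem.Dict.getD (PySem.Dict.mk ir.2) c ""

lemma pvIdxRow_nil (row : List (String × String)) (tag : String)
    (ts : List (PySem.Dict String (PySem.Set String))) :
    pvIdxRow row tag [] ts = [] := by cases ts <;> rfl

-- interchange: folding B's row-update over the rows acts independently on each column slot
lemma pv_fold_idxRow_cons (l : List (Int × List (String × String))) (sm : List (Int × String))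
    (c : String) (cs : List String)
    (t : PySem.Dict String (PySem.Set String))
    (ts : List (PySem.Dict String (PySem.Set String))) :
    l.foldl (fun st ir => pvIdxRow ir.2 (pvTag sm ir) (c :: cs) st) (t :: ts)
      = l.foldl (fun d ir => PySem.Dict.modify d (pvCls c ir) PySem.Set.empty (fun s => PySem.Set.add s (pvTag sm ir))) t
        :: l.foldl (fun st ir => pvIdxRow ir.2 (pvTag sm ir) cs st) ts := by
  induction l generalizing t ts with
  | nil => rfl
  | cons ir l ih =>
      simp only [List.foldl_cons]
      rw [show pvIdxRow ir.2 (pvTag sm ir) (c :: cs) (t :: ts)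
            = PySem.Dict.modify t (pvCls c ir) PySem.Set.empty (fun s => PySem.Set.add s (pvTag sm ir))
              :: pvIdxRow ir.2 (pvTag sm ir) cs ts from rfl]
      exact ih _ _

lemma pv_fold_idxRow_nil (l : List (Int × List (String × String))) (sm : List (Int × String)) :
    l.foldl (fun st ir => pvIdxRow ir.2 (pvTag sm ir) [] st)
      ([] : List (PySem.Dict String (PySem.Set String))) = [] := by
  induction l with
  | nil => rfl
  | cons ir l ih => simpa [pvIdxRow_nil] using ih

-- B's state after the row pass, column by column
lemma pv_state_eq (l : List (Int × List (String × String))) (sm : List (Int × String))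
    (cols : List String) :
    l.foldl (fun st ir => pvIdxRow ir.2 (pvTag sm ir) cols st)
      (cols.map (fun _ => PySem.Dict.empty))
      = cols.map (fun c => l.foldl (fun d ir => PySem.Dict.modify d (pvCls c ir) PySem.Set.empty (fun s => PySem.Set.add s (pvTag sm ir)))
          PySem.Dict.empty) := by
  induction cols with
  | nil => simpa using pv_fold_idxRow_nil l sm
  | cons c cs ih => simp only [List.map_cons, pv_fold_idxRow_cons, ih]

-- A's pair fold splits into the by_split dict fold and the all-classes fold
lemma pv_fold_A_pair (l : List (Int × List (String × String))) (sm : List (Int × String))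
    (c : String) (d : PySem.Dict String (PySem.Set String)) (a : PySem.Set String) :
    l.foldl (fun st ir =>
        (PySem.Dict.insert st.1 (pvTag sm ir)
          (PySem.Set.add (PySem.Dict.getD st.1 (pvTag sm ir) PySem.Set.empty) (pvCls c ir)),
         PySem.Set.add st.2 (pvCls c ir))) (d, a)
      = (l.foldl (fun d ir => PySem.Dict.insert d (pvTag sm ir)
            (PySem.Set.add (PySem.Dict.getD d (pvTag sm ir) PySem.Set.empty) (pvCls c ir))) d,
         l.foldl (fun s ir => PySem.Set.add s (pvCls c ir)) a) := by
  induction l generalizing d a with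
  | nil => rfl
  | cons ir l ih => simp only [List.foldl_cons]; exact ih _ _

-- membership inversion: A's tag -> classes dict and B's class -> tags dict record the same pairs
lemma pv_inv (l : List (Int × List (String × String))) (sm : List (Int × String)) (c : String)
    (dA dB : PySem.Dict String (PySem.Set String))
    (h : ∀ t x, x ∈ PySem.Dict.getD dA t PySem.Set.empty ↔ t ∈ PySem.Dict.getD dB x PySem.Set.empty) :
    ∀ t x, x ∈ PySem.Dict.getD
        (l.foldl (fun d ir => PySem.Dict.insert d (pvTag sm ir)
          (PySem.Set.add (PySem.Dict.getD d (pvTag sm ir) PySem.Set.empty) (pvCls c ir))) dA)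
        t PySem.Set.empty
      ↔ t ∈ PySem.Dict.getD
        (l.foldl (fun d ir => PySem.Dict.modify d (pvCls c ir) PySem.Set.empty (fun s => PySem.Set.add s (pvTag sm ir))) dB)
        x PySem.Set.empty := by
  induction l generalizing dA dB with
  | nil => exact h
  | cons ir l ih =>
      simp only [List.foldl_cons]
      apply ih
      intro t x
      rw [PySem.Dict.getD_insert, PySem.Dict.getD_modify]
      simp only [PySem.Set.empty] at h
      by_cases ht : t = pvTag sm ir <;> by_cases hx : x = pvCls c ir <;>
        simp [ht, hx, PySem.Set.mem_add, PySem.Set.empty,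
          h t x, h (pvTag sm ir) x, h t (pvCls c ir)]

-- the per-column missing set: A's set difference equals B's filtered inverted-index keys
lemma pv_missing_eq (l : List (Int × List (String × String))) (sm : List (Int × String))
    (c : String) (tgt : String) :
    PySem.Set.diff (l.foldl (fun s ir => PySem.Set.add s (pvCls c ir)) PySem.Set.empty)
      (PySem.Dict.getD
        (l.foldl (fun d ir => PySem.Dict.insert d (pvTag sm ir)
          (PySem.Set.add (PySem.Dict.getD d (pvTag sm ir) PySem.Set.empty) (pvCls c ir))) PySem.Dict.empty)
        tgt PySem.Set.empty)
    = PySem.Set.ofList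
        (((l.foldl (fun d ir => PySem.Dict.modify d (pvCls c ir) PySem.Set.empty (fun s => PySem.Set.add s (pvTag sm ir))) PySem.Dict.empty).items.filter
          (fun p => !(PySem.Set.contains p.2 tgt))).map (·.1)) := by
  have hnd : (l.foldl (fun d ir => PySem.Dict.modify d (pvCls c ir) PySem.Set.empty (fun s => PySem.Set.add s (pvTag sm ir))) PySem.Dict.empty).keys.Nodup := by
    exact PySem.Dict.nodup_keys_foldl_modify_key l (fun ir => pvCls c ir) PySem.Set.empty
      (fun d ir s => PySem.Set.add s (pvTag sm ir)) PySem.Dict.empty (by simp [PySem.Dict.keys_empty])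
  have hkeys : (l.foldl (fun d ir => PySem.Dict.modify d (pvCls c ir) PySem.Set.empty (fun s => PySem.Set.add s (pvTag sm ir))) PySem.Dict.empty).keys
      = PySem.Set.ofList (l.map (pvCls c)) := by
    rw [PySem.Dict.keys_foldl_modify_key l (fun ir => pvCls c ir) PySem.Set.empty
      (fun d ir s => PySem.Set.add s (pvTag sm ir)) PySem.Dict.empty]
    simp [PySem.Dict.keys_empty, PySem.Set.update_nil_left]
  have hall : l.foldl (fun s ir => PySem.Set.add s (pvCls c ir)) PySem.Set.empty
      = PySem.Set.ofList (l.map (pvCls c)) := by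
    rw [← PySem.Set.update_map_eq_foldl_add,
      show (PySem.Set.empty : PySem.Set String) = [] from rfl, PySem.Set.update_nil_left]
  rw [PySem.Dict.items_eq_map_keys _ hnd PySem.Set.empty, List.filter_map, List.map_map]
  have hmapfst : ∀ ks : List String,
      (ks.filter ((fun p => !(PySem.Set.contains p.2 tgt)) ∘ (fun k => (k, PySem.Dict.getD (l.foldl (fun d ir => PySem.Dict.modify d (pvCls c ir) PySem.Set.empty (fun s => PySem.Set.add s (pvTag sm ir))) PySem.Dict.empty) k PySem.Set.empty)))).map ((·.1) ∘ (fun k => (k, PySem.Dict.getD (l.foldl (fun d ir => PySem.Dict.modify d (pvCls c ir) PySem.Set.empty (fun s => PySem.Set.add s (pvTag sm ir))) PySem.Dict.empty) k PySem.Set.empty)))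
      = ks.filter (fun k => !(PySem.Set.contains (PySem.Dict.getD (l.foldl (fun d ir => PySem.Dict.modify d (pvCls c ir) PySem.Set.empty (fun s => PySem.Set.add s (pvTag sm ir))) PySem.Dict.empty) k PySem.Set.empty) tgt)) := by
    intro ks; simp [Function.comp_def]
  rw [hmapfst]
  rw [PySem.Set.ofList_eq_self_of_nodup _ (by rw [hkeys] at hnd; exact List.Nodup.filter _ (hkeys ▸ hnd))]
  unfold PySem.Set.diff
  rw [hall, ← hkeys]
  refine List.filter_congr (fun x hx => ?_)
  have hmem := pv_inv l sm c PySem.Dict.empty PySem.Dict.empty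
    (by intro t y; simp [PySem.Dict.getD_empty]) tgt x
  have hcb : PySem.Set.contains
      (PySem.Dict.getD (l.foldl (fun d ir => PySem.Dict.insert d (pvTag sm ir)
        (PySem.Set.add (PySem.Dict.getD d (pvTag sm ir) PySem.Set.empty) (pvCls c ir))) PySem.Dict.empty) tgt PySem.Set.empty) x
      = PySem.Set.contains (PySem.Dict.getD (l.foldl (fun d ir => PySem.Dict.modify d (pvCls c ir) PySem.Set.empty (fun s => PySem.Set.add s (pvTag sm ir))) PySem.Dict.empty) x PySem.Set.empty) tgt := by
    rw [Bool.eq_iff_iff, PySem.Set.contains_iff, PySem.Set.contains_iff]; exact hmem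
  rw [hcb]

-- folding over 'zip cols (cols.map g)' is folding over cols
lemma pv_foldl_zip_map {α β γ : Type} (cols : List α) (g : α → β)
    (F : γ → α × β → γ) (init : γ) :
    (cols.zip (cols.map g)).foldl F init = cols.foldl (fun acc c => F acc (c, g c)) init := by
  induction cols generalizing init with
  | nil => rfl
  | cons c cs ih => simp only [List.map_cons, List.zip_cons_cons, List.foldl_cons, ih]

-- ===== VERDICT (by name: the statement is the Claim_ definition above) =====
theorem is_degenerate_spec : Claim_equal_is_degenerate := by
  intro rows split_map label_cols _ _
  unfold Spec_is_degenerate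
  simp only [is_degenerate, is_degenerate_alt]
  have hst := pv_state_eq (PySem.List.enumerate rows) split_map label_cols
  simp only [pvTag, pvCls] at hst
  rw [hst, pv_foldl_zip_map]
  refine PySem.List.foldl_congr_mem _ _ _ _ (fun issues col _ => ?_)
  have hp := pv_fold_A_pair (PySem.List.enumerate rows) split_map col PySem.Dict.empty PySem.Set.empty
  have hv := pv_missing_eq (PySem.List.enumerate rows) split_map col "val"
  have ht := pv_missing_eq (PySem.List.enumerate rows) split_map col "test"
  simp only [pvTag, pvCls] at hp hv ht
  rw [hp]
  simp only [hv, ht]
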